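-- pv_equiv track=rewrite | github.com/longpham6595/C-learning | RealTests/[DucHoa]VongTruong20252026/Bai5/genTestCases.py | solve_from_cpp_logic
-- ===== SOURCE A (Python) =====
-- def solve_from_cpp_logic(n, y, c_list):
--     """
--     Hàm giải mô phỏng thuật toán O(C_MAX * log(C_MAX)) từ code C++.
--     Cực kỳ nhanh vì C_MAX được giới hạn.
--     """
--     if not c_list: return 0
--
--     C_MAX = 200005
--     count = [0] * C_MAX
--     max_c = 0
--     for c in c_list:
--         if c < C_MAX:
--             count[c] += 1
--             max_c = max(max_c, c)
--
--     prefix_count = [0] * C_MAX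
--     prefix_count[0] = count[0]
--     for i in range(1, C_MAX):
--         prefix_count[i] = prefix_count[i - 1] + count[i]
--
--     def get_count_in_range(start, end): # Đếm số lượng trong khoảng [start, end]
--         if start > end or start >= C_MAX: return 0
--         end = min(end, C_MAX - 1)
--         if start == 0: return prefix_count[end]
--         return prefix_count[end] - prefix_count[start - 1]
--
--     # Chuẩn bị cho việc tính doanh thu nhanh
--     count_prime = [0] * C_MAX
--     for i in range(C_MAX - 1): count_prime[i] = count[i + 1]
--
--     ge_count_prime = [0] * C_MAX
--     for i in range(C_MAX - 2, -1, -1):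
--         ge_count_prime[i] = ge_count_prime[i + 1] + count_prime[i]
--
--     max_income = -float('inf')
--
--     # Vòng lặp chính qua x, đây là phần O(C_MAX * log C_MAX)
--     for x in range(2, max_c + 2):
--         # 1. Tính doanh thu (Revenue)
--         sum_floor_prime = 0
--         j = 1
--         while j * x < C_MAX:
--             sum_floor_prime += ge_count_prime[j * x]
--             j += 1
--         total_new_value = n + sum_floor_prime
--
--         # 2. Tính chi phí in tem (Cost)
--         reused_tags = 0
--         p = 1
--         while (p - 1) * x < C_MAX:
--             # Số lượng item có giá mới là p: ceil(c/x) = p <=> (p-1)*x < c <= p*x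
--             start_c = (p - 1) * x + 1
--             end_c = p * x
--             num_new_p = get_count_in_range(start_c, end_c)
--
--             if num_new_p > 0:
--                 num_old_p = count[p] if p < C_MAX else 0
--                 reused_tags += min(num_new_p, num_old_p)
--             p += 1
--
--         # 3. Cập nhật lợi nhuận tối đa
--         current_income = total_new_value - (n - reused_tags) * y
--         max_income = max(max_income, current_income)
--
--     return max_income if max_income != -float('inf') else 0
-- ===== SOURCE B (Python) =====
-- def solve_from_cpp_logic(n, y, c_list):
--     # Same optimum, computed per item: for each x, revenue n + sum((c-1)//x) and
--     # reused tags via two small counters, with no 200005-sized arrays or prefix sums.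
--     if not c_list:
--         return 0
--     C_MAX = 200005
--     vals = [c for c in c_list if 1 <= c < C_MAX]
--     max_c = max(vals, default=0)
--     if max_c == 0:
--         return 0
--     orig = {}
--     for c in vals:
--         orig[c] = orig.get(c, 0) + 1
--     best = None
--     for x in range(2, max_c + 2):
--         new_value = n
--         newcnt = {}
--         for c in vals:
--             new_value += (c - 1) // x
--             p = -(-c // x)  # ceil(c/x)
--             newcnt[p] = newcnt.get(p, 0) + 1
--         reused = sum(min(k, orig.get(p, 0)) for p, k in newcnt.items())
--         income = new_value - (n - reused) * y
--         if best is None or income > best: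
--             best = income
--     return best
-- ===== Notes on version B (the rewrite author's own statement) =====
-- stated objective: simpler
-- what changed: B drops the four 200005-sized arrays, the prefix sums and the range-counting entirely: for each x it accumulates the revenue per item as (c-1)//x and buckets new prices ceil(c/x) in a small dict, adding reused tags as min(new-count, original-count) per bucket.
-- outside the precondition, e.g. on solve_from_cpp_logic(2, 3, [-1, 5]): A returns 99999, B returns -2; on solve_from_cpp_logic(1, 1, [-300000]): A raises IndexError, B returns 0
import Mathlib
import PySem

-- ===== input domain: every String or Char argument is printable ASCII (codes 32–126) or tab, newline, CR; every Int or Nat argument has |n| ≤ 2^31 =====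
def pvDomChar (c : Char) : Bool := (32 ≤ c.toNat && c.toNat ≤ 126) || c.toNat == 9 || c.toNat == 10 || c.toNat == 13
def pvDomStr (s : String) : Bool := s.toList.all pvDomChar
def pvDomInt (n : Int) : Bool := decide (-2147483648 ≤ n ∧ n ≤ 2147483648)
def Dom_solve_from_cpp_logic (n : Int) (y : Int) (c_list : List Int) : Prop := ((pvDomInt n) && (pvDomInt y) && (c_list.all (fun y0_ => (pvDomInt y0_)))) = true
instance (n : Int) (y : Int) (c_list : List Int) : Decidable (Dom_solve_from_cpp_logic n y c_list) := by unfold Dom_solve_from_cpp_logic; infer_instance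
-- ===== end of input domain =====

-- B replaces A's four 200005-sized arrays, prefix sums and harmonic bucket scans by a direct
-- per-item accumulation ((c-1)//x) plus two small counting dicts; same optimum, simpler code.

-- ===== PORT A =====
-- Python list indexing on the internal arrays (index known in range on Pre_; negative index wraps as in Python)
def pvArrGet (a : Array Int) (i : Int) : Int :=
  if 0 ≤ i then a.getD i.toNat 0 else a.getD (i + a.size).toNat 0

def pvArrSet (a : Array Int) (i : Int) (v : Int) : Array Int :=
  if 0 ≤ i then a.setIfInBounds i.toNat v else a.setIfInBounds (i + a.size).toNat v

-- `if start > end or start >= C_MAX: return 0 …` of A's get_count_in_range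
def pvCountRange (pre : Array Int) (start stop : Int) : Int :=
  if start > stop ∨ start ≥ 200005 then 0
  else
    let e := min stop 200004
    if start = 0 then pvArrGet pre e else pvArrGet pre e - pvArrGet pre (start - 1)

-- `while j * x < C_MAX: sum += ge[j*x]; j += 1` (the `0 < x` conjunct only makes the loop total;
-- every call has x ≥ 2)
def pvWhileRev (x : Int) (ge : Array Int) (j acc : Int) : Int :=
  if h : 0 < x ∧ j * x < 200005 then
    pvWhileRev x ge (j + 1) (acc + pvArrGet ge (j * x))
  else acc
termination_by (200005 - j * x).toNat
decreasing_by
  rcases h with ⟨hx, hlt⟩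
  have hexp : (j + 1) * x = j * x + x := by ring
  omega

-- `while (p - 1) * x < C_MAX: …` cost loop of A (same totality guard)
def pvWhileCost (x : Int) (pre cnt : Array Int) (p acc : Int) : Int :=
  if h : 0 < x ∧ (p - 1) * x < 200005 then
    let num := pvCountRange pre ((p - 1) * x + 1) (p * x)
    pvWhileCost x pre cnt (p + 1)
      (if num > 0 then acc + min num (if p < 200005 then pvArrGet cnt p else 0) else acc)
  else acc
termination_by (200005 - (p - 1) * x).toNat
decreasing_by
  rcases h with ⟨hx, hlt⟩
  have hexp : (p + 1 - 1) * x = (p - 1) * x + x := by ring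
  omega

def solve_from_cpp_logic (n : Int) (y : Int) (c_list : List Int) : Int :=
  if c_list = [] then 0 else
  let st := c_list.foldl
      (fun (st : Array Int × Int) c =>
        if c < 200005 then (pvArrSet st.1 c (pvArrGet st.1 c + 1), max st.2 c) else st)
      (Array.replicate 200005 0, 0)
  let count := st.1
  let max_c := st.2
  let pre := (PySem.List.pyRange 1 200005 1).foldl
      (fun a i => pvArrSet a i (pvArrGet a (i - 1) + pvArrGet count i))
      (pvArrSet (Array.replicate 200005 0) 0 (pvArrGet count 0))
  let cp := (PySem.List.pyRange 0 200004 1).foldl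
      (fun a i => pvArrSet a i (pvArrGet count (i + 1))) (Array.replicate 200005 0)
  let ge := (PySem.List.pyRange 200003 (-1) (-1)).foldl
      (fun a i => pvArrSet a i (pvArrGet a (i + 1) + pvArrGet cp i)) (Array.replicate 200005 0)
  -- max_income = -inf is `none`
  let maxInc := (PySem.List.pyRange 2 (max_c + 2) 1).foldl
      (fun (mi : Option Int) x =>
        some (match mi with
              | none => (n + pvWhileRev x ge 1 0) - (n - pvWhileCost x pre count 1 0) * y
              | some v => max v ((n + pvWhileRev x ge 1 0) - (n - pvWhileCost x pre count 1 0) * y)))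
      none
  match maxInc with
  | none => 0
  | some v => v

-- ===== PORT B =====
def solve_from_cpp_logic_alt (n : Int) (y : Int) (c_list : List Int) : Int :=
  if c_list = [] then 0 else
  let vals := c_list.filter (fun c => decide (1 ≤ c ∧ c < 200005))
  let max_c := PySem.List.maxD vals (fun v => v) 0
  if max_c = 0 then 0 else
  let orig := vals.foldl (fun (d : PySem.Dict Int Int) c => d.insert c (d.getD c 0 + 1))
      PySem.Dict.empty
  let best := (PySem.List.pyRange 2 (max_c + 2) 1).foldl
      (fun (best : Option Int) x =>
        let st := vals.foldl
            (fun (st : Int × PySem.Dict Int Int) c =>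
              (st.1 + PySem.Int.floordiv (c - 1) x,
               st.2.insert (-(PySem.Int.floordiv (-c) x))
                 (st.2.getD (-(PySem.Int.floordiv (-c) x)) 0 + 1)))
            (n, PySem.Dict.empty)
        let reused := (st.2.items.map (fun pk => min pk.2 (orig.getD pk.1 0))).sum
        let income := st.1 - (n - reused) * y
        match best with
        | none => some income
        | some b => if income > b then some income else some b)
      none
  -- best is never `none` here (max_c ≥ 1 makes the range nonempty); 0 is a totality default
  match best with
  | none => 0
  | some v => v

-- ===== PRECONDITION & SPEC =====
-- Pre_ excludes lists containing a negative element: for c ≤ -200006 A raises IndexError, and for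
-- -200005 ≤ c ≤ -1 Python's negative list index silently counts the item as one of value
-- c + 200005 — an accident of the array implementation (B counts only the value-c item itself).
def Pre_solve_from_cpp_logic (n : Int) (y : Int) (c_list : List Int) : Prop :=
  ∀ c ∈ c_list, 0 ≤ c
instance (n : Int) (y : Int) (c_list : List Int) : Decidable (Pre_solve_from_cpp_logic n y c_list) := by
  unfold Pre_solve_from_cpp_logic; infer_instance

def pvWitness_solve_from_cpp_logic : Int × Int × List Int := (3, 1, [2, 5, 5])

def Spec_solve_from_cpp_logic (n : Int) (y : Int) (c_list : List Int) (out : Int) : Prop :=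
  out = solve_from_cpp_logic_alt n y c_list
instance (n : Int) (y : Int) (c_list : List Int) (out : Int) : Decidable (Spec_solve_from_cpp_logic n y c_list out) := by
  unfold Spec_solve_from_cpp_logic; infer_instance

-- ===== CLAIM (what is proved, stated in full; the proofs are below) =====
def Claim_equal_solve_from_cpp_logic : Prop := ∀ (n : Int) (y : Int) (c_list : List Int), Dom_solve_from_cpp_logic n y c_list → Pre_solve_from_cpp_logic n y c_list → Spec_solve_from_cpp_logic n y c_list (solve_from_cpp_logic n y c_list)

-- ===== LEMMAS AND PROOFS =====

theorem size_pvArrSet (a : Array Int) (i v : Int) : (pvArrSet a i v).size = a.size := by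
  unfold pvArrSet; split <;> simp

theorem pvArrGet_replicate (n : Nat) (i : Int) :
    pvArrGet (Array.replicate n (0:Int)) i = 0 := by
  unfold pvArrGet
  have key : ∀ k : Nat, (Array.replicate n (0:Int)).getD k 0 = 0 := by
    intro k
    rcases Nat.lt_or_ge k n with h | h
    · have h' : k < (Array.replicate n (0:Int)).size := by simpa using h
      rw [Array.getD_eq_getD_getElem?, Array.getElem?_eq_getElem h']
      simp
    · rw [Array.getD_eq_getD_getElem?, Array.getElem?_eq_none (by simpa using h)]
      rfl
  split <;> rw [key]

theorem pvArrGet_set_self (a : Array Int) (i v : Int) (h0 : 0 ≤ i) (h : i < (a.size : Int)) :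
    pvArrGet (pvArrSet a i v) i = v := by
  have hlt : i.toNat < a.size := by omega
  have hlt' : i.toNat < (a.setIfInBounds i.toNat v).size := by simpa using hlt
  simp only [pvArrGet, pvArrSet, if_pos h0, Array.getD_eq_getD_getElem?,
    Array.getElem?_eq_getElem hlt']
  simp [Array.getElem_setIfInBounds]

theorem pvArrGet_set_ne (a : Array Int) (i j v : Int) (hi : 0 ≤ i) (hj : 0 ≤ j) (hne : i ≠ j) :
    pvArrGet (pvArrSet a i v) j = pvArrGet a j := by
  have hne' : i.toNat ≠ j.toNat := by omega
  simp only [pvArrGet, pvArrSet, if_pos hi, if_pos hj, Array.getD_eq_getD_getElem?]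
  by_cases hjs : j.toNat < a.size
  · have hjs' : j.toNat < (a.setIfInBounds i.toNat v).size := by simpa using hjs
    rw [Array.getElem?_eq_getElem hjs', Array.getElem?_eq_getElem hjs]
    simp [Array.getElem_setIfInBounds hjs, hne']
  · rw [Array.getElem?_eq_none (by simpa using hjs), Array.getElem?_eq_none (by omega)]

theorem pv_countP_le_split (v : List Int) (a b : Int) (hab : a ≤ b) :
    v.countP (fun c => decide (c ≤ b)) =
      v.countP (fun c => decide (c ≤ a)) + v.countP (fun c => decide (a < c ∧ c ≤ b)) := by
  induction v with
  | nil => simp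
  | cons c t ih =>
    simp only [List.countP_cons, ih]
    by_cases h1 : c ≤ a <;> by_cases h2 : c ≤ b <;> by_cases h3 : a < c ∧ c ≤ b <;>
      simp [h1, h2, h3, decide_eq_true_eq] <;> (try split_ifs) <;> omega

theorem pv_countP_le_succ (v : List Int) (i : Int) :
    v.countP (fun c => decide (c ≤ i)) =
      v.countP (fun c => decide (c ≤ i - 1)) + v.count i := by
  induction v with
  | nil => simp
  | cons c t ih =>
    simp only [List.countP_cons, List.count_cons, ih]
    by_cases h1 : c ≤ i - 1 <;> by_cases h2 : c = i <;> by_cases h3 : c ≤ i <;>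
      simp [h1, h2, h3, decide_eq_true_eq] <;> (try split_ifs) <;> omega

theorem pv_countP_gt_succ (v : List Int) (i : Int) :
    v.countP (fun c => decide (i < c)) =
      v.countP (fun c => decide (i + 1 < c)) + v.count (i + 1) := by
  induction v with
  | nil => simp
  | cons c t ih =>
    simp only [List.countP_cons, List.count_cons, ih]
    by_cases h1 : i + 1 < c <;> by_cases h2 : c = i + 1 <;> by_cases h3 : i < c <;>
      simp [h1, h2, h3, decide_eq_true_eq] <;> (try split_ifs) <;> omega

theorem pv_sum_ite_eq_sum_filter {α : Type} (l : List α) (P : α → Prop) [DecidablePred P]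
    (f : α → Int) :
    (l.map (fun p => if P p then f p else 0)).sum =
      ((l.filter (fun p => decide (P p))).map f).sum := by
  induction l with
  | nil => simp
  | cons c t ih =>
    by_cases h : P c <;> simp [h, ih]

theorem pv_nodup_pyRange_one (a b : Int) : (PySem.List.pyRange a b 1).Nodup := by
  rw [PySem.List.pyRange_of_pos _ _ (by norm_num)]
  exact List.nodup_range.map (fun x y h => by omega)

theorem pv_pyRange_one_nil (a b : Int) (h : b ≤ a) : PySem.List.pyRange a b 1 = [] := by
  rw [PySem.List.pyRange_of_pos _ _ (by norm_num)]
  rw [if_neg (by omega)]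
  simp

theorem pv_countP_pyRange_le (d : Int) :
    ∀ (k : Nat) (a : Int), (((PySem.List.pyRange a (a + (k : Int)) 1).countP
      (fun q => decide (q ≤ d))) : Int) = max 0 (min (a + k) (d + 1) - a) := by
  intro k
  induction k with
  | zero => intro a; rw [pv_pyRange_one_nil _ _ (by omega)]; simp
  | succ m ih =>
    intro a
    have he : a + ((m + 1 : Nat) : Int) = (a + 1) + (m : Int) := by push_cast; ring
    rw [he, PySem.List.pyRange_one_cons (by omega)]
    have hi := ih (a + 1)
    simp only [List.countP_cons]
    by_cases h : a ≤ d <;> simp [h, decide_eq_true_eq] <;> push_cast at hi ⊢ <;> omega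

theorem pv_arrCount (v : List Int) : (∀ c ∈ v, 0 ≤ c ∧ c < 200005) →
    ∀ a : Array Int, a.size = 200005 →
      (v.foldl (fun a c => pvArrSet a c (pvArrGet a c + 1)) a).size = 200005 ∧
      ∀ i : Int, 0 ≤ i →
        pvArrGet (v.foldl (fun a c => pvArrSet a c (pvArrGet a c + 1)) a) i
          = pvArrGet a i + v.count i := by
  induction v with
  | nil => intro _ a ha; simp [ha]
  | cons c t ih =>
    intro hv a ha
    obtain ⟨hc0, hcM⟩ := hv c (by simp)
    have ht : ∀ c ∈ t, 0 ≤ c ∧ c < 200005 := fun c hc => hv c (by simp [hc])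
    have ha' : (pvArrSet a c (pvArrGet a c + 1)).size = 200005 := by
      rw [size_pvArrSet]; exact ha
    obtain ⟨hs, hg⟩ := ih ht (pvArrSet a c (pvArrGet a c + 1)) ha'
    refine ⟨hs, ?_⟩
    intro i hi
    rw [List.foldl_cons, hg i hi, List.count_cons]
    by_cases hic : c = i
    · subst hic
      rw [pvArrGet_set_self _ _ _ hc0 (by omega)]
      simp; omega
    · rw [pvArrGet_set_ne _ _ _ _ hc0 hi hic]
      simp [hic]

theorem pv_sweepUp (g h : Int → Int)
    (hstep : ∀ i : Int, 1 ≤ i → i < 200005 → g i = g (i - 1) + h i) :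
    ∀ (k : Nat) (lo : Int) (a : Array Int), lo = 200005 - (k : Int) → 1 ≤ lo →
      a.size = 200005 →
      (∀ t : Int, 0 ≤ t → t < lo → pvArrGet a t = g t) →
      ((PySem.List.pyRange lo 200005 1).foldl
          (fun a i => pvArrSet a i (pvArrGet a (i - 1) + h i)) a).size = 200005 ∧
      ∀ t : Int, 0 ≤ t → t < 200005 →
        pvArrGet ((PySem.List.pyRange lo 200005 1).foldl
          (fun a i => pvArrSet a i (pvArrGet a (i - 1) + h i)) a) t = g t := by
  intro k
  induction k with
  | zero =>
    intro lo a hlo _ ha hinv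
    rw [pv_pyRange_one_nil _ _ (by omega)]
    exact ⟨ha, fun t ht1 ht2 => hinv t ht1 (by omega)⟩
  | succ m ih =>
    intro lo a hlo hlo1 ha hinv
    rw [PySem.List.pyRange_one_cons (by push_cast at hlo; omega)]
    rw [List.foldl_cons]
    have ha' : (pvArrSet a lo (pvArrGet a (lo - 1) + h lo)).size = 200005 := by
      rw [size_pvArrSet]; exact ha
    refine ih (lo + 1) _ (by push_cast at hlo ⊢; omega) (by omega) ha' ?_
    intro t ht1 ht2
    by_cases hteq : t = lo
    · subst hteq
      rw [pvArrGet_set_self _ _ _ (by omega) (by omega)]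
      rw [hinv (t - 1) (by omega) (by omega)]
      exact (hstep t (by omega) (by push_cast at hlo; omega)).symm
    · rw [pvArrGet_set_ne _ _ _ _ (by omega) ht1 (fun hh => hteq hh.symm)]
      exact hinv t ht1 (by omega)

theorem pv_sweepMap (h : Int → Int) :
    ∀ (k : Nat) (lo : Int) (a : Array Int), lo = 200004 - (k : Int) → 0 ≤ lo →
      a.size = 200005 →
      (∀ t : Int, 0 ≤ t → t < lo → pvArrGet a t = h t) →
      (∀ t : Int, lo ≤ t → pvArrGet a t = pvArrGet (Array.replicate 200005 (0:Int)) t) →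
      ((PySem.List.pyRange lo 200004 1).foldl (fun a i => pvArrSet a i (h i)) a).size = 200005 ∧
      (∀ t : Int, 0 ≤ t → t < 200004 →
        pvArrGet ((PySem.List.pyRange lo 200004 1).foldl (fun a i => pvArrSet a i (h i)) a) t = h t) ∧
      pvArrGet ((PySem.List.pyRange lo 200004 1).foldl (fun a i => pvArrSet a i (h i)) a) 200004 = 0 := by
  intro k
  induction k with
  | zero =>
    intro lo a hlo _ ha hinv hrest
    rw [pv_pyRange_one_nil _ _ (by omega)]
    simp only [List.foldl_nil]
    refine ⟨ha, fun t ht1 ht2 => hinv t ht1 (by omega), ?_⟩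
    rw [hrest 200004 (by omega), pvArrGet_replicate]
  | succ m ih =>
    intro lo a hlo hlo0 ha hinv hrest
    rw [PySem.List.pyRange_one_cons (by push_cast at hlo; omega), List.foldl_cons]
    have ha' : (pvArrSet a lo (h lo)).size = 200005 := by rw [size_pvArrSet]; exact ha
    refine ih (lo + 1) _ (by push_cast at hlo ⊢; omega) (by omega) ha' ?_ ?_
    · intro t ht1 ht2
      by_cases hteq : t = lo
      · subst hteq
        rw [pvArrGet_set_self _ _ _ (by omega) (by omega)]
      · rw [pvArrGet_set_ne _ _ _ _ (by omega) ht1 (fun hh => hteq hh.symm)]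
        exact hinv t ht1 (by omega)
    · intro t ht
      rw [pvArrGet_set_ne _ _ _ _ (by omega) (by omega) (by omega)]
      exact hrest t (by omega)

theorem pv_pyRange_neg_one_nil : PySem.List.pyRange (-1) (-1) (-1) = [] := by
  simp [PySem.List.pyRange]

theorem pv_pyRange_neg_one_cons (a : Int) (h : 0 ≤ a) :
    PySem.List.pyRange a (-1) (-1) = a :: PySem.List.pyRange (a - 1) (-1) (-1) := by
  simp only [PySem.List.pyRange, if_neg (by norm_num : ¬((-1:Int) = 0)),
    if_neg (by omega : ¬(0:Int) < -1), if_pos (by omega : (-1:Int) < a)]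
  have h1 : (a - -1 + -(-1) - 1) / -(-1) = a + 1 := by
    have : a - -1 + -(-1) - 1 = a + 1 := by ring
    rw [this]; exact Int.ediv_one _
  rw [h1]
  have h2 : (a + 1).toNat = a.toNat + 1 := by omega
  rw [h2, List.range_succ_eq_map, List.map_cons, List.map_map]
  congr 1
  · simp
  · by_cases ha1 : (-1:Int) < a - 1
    · rw [if_pos ha1]
      have h3 : (a - 1 - -1 + -(-1) - 1) / -(-1) = a := by
        have : a - 1 - -1 + -(-1) - 1 = a := by ring
        rw [this]; exact Int.ediv_one _
      rw [h3]
      refine List.map_congr_left ?_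
      intro k _
      simp only [Function.comp]
      push_cast
      ring
    · rw [if_neg ha1]
      have ha0 : a = 0 := by omega
      subst ha0
      simp

theorem pv_sweepDown (g h : Int → Int)
    (hstep : ∀ i : Int, 0 ≤ i → i ≤ 200003 → g i = g (i + 1) + h i) :
    ∀ (k : Nat) (hi : Int) (a : Array Int), hi = (k : Int) - 1 → hi ≤ 200003 →
      a.size = 200005 →
      (∀ t : Int, hi < t → t ≤ 200004 → pvArrGet a t = g t) →
      ((PySem.List.pyRange hi (-1) (-1)).foldl
          (fun a i => pvArrSet a i (pvArrGet a (i + 1) + h i)) a).size = 200005 ∧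
      ∀ t : Int, 0 ≤ t → t ≤ 200004 →
        pvArrGet ((PySem.List.pyRange hi (-1) (-1)).foldl
          (fun a i => pvArrSet a i (pvArrGet a (i + 1) + h i)) a) t = g t := by
  intro k
  induction k with
  | zero =>
    intro hi a hhi _ ha hinv
    have : hi = -1 := by omega
    subst this
    rw [pv_pyRange_neg_one_nil]
    exact ⟨ha, fun t ht1 ht2 => hinv t (by omega) ht2⟩
  | succ m ih =>
    intro hi a hhi hhi3 ha hinv
    rw [pv_pyRange_neg_one_cons _ (by omega), List.foldl_cons]
    have ha' : (pvArrSet a hi (pvArrGet a (hi + 1) + h hi)).size = 200005 := by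
      rw [size_pvArrSet]; exact ha
    refine ih (hi - 1) _ (by push_cast at hhi ⊢; omega) (by omega) ha' ?_
    intro t ht1 ht2
    by_cases hteq : t = hi
    · subst hteq
      rw [pvArrGet_set_self _ _ _ (by omega) (by omega)]
      rw [hinv (t + 1) (by omega) (by omega)]
      exact (hstep t (by omega) (by omega)).symm
    · rw [pvArrGet_set_ne _ _ _ _ (by omega) (by omega) (fun hh => hteq hh.symm)]
      exact hinv t (by omega) ht2

theorem pv_whileRev_eq (x : Int) (hx : 0 < x) (ge : Array Int) :
    ∀ (j acc : Int), pvWhileRev x ge j acc =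
      acc + ((PySem.List.pyRange j (PySem.Int.floordiv 200004 x + 1) 1).map
        (fun k => pvArrGet ge (k * x))).sum := by
  have H : ∀ (n : Nat) (j acc : Int), (200005 - j * x).toNat ≤ n →
      pvWhileRev x ge j acc =
        acc + ((PySem.List.pyRange j (PySem.Int.floordiv 200004 x + 1) 1).map
          (fun k => pvArrGet ge (k * x))).sum := by
    intro n
    induction n with
    | zero =>
      intro j acc hn
      have hj : ¬ (j * x < 200005) := by omega
      rw [pvWhileRev, dif_neg (by tauto)]
      have hjK : ¬ (j ≤ PySem.Int.floordiv 200004 x) := by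
        rw [PySem.Int.le_floordiv_iff_mul_le hx]; omega
      rw [pv_pyRange_one_nil _ _ (by omega)]
      simp
    | succ m ih =>
      intro j acc hn
      by_cases hj : j * x < 200005
      · rw [pvWhileRev, dif_pos ⟨hx, hj⟩]
        have hjK : j ≤ PySem.Int.floordiv 200004 x := by
          rw [PySem.Int.le_floordiv_iff_mul_le hx]; omega
        have hexp : (j + 1) * x = j * x + x := by ring
        rw [PySem.List.pyRange_one_cons (by omega)]
        rw [ih (j + 1) _ (by omega)]
        simp only [List.map_cons, List.sum_cons]
        ring
      · rw [pvWhileRev, dif_neg (by tauto)]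
        have hjK : ¬ (j ≤ PySem.Int.floordiv 200004 x) := by
          rw [PySem.Int.le_floordiv_iff_mul_le hx]; omega
        rw [pv_pyRange_one_nil _ _ (by omega)]
        simp
  intro j acc
  exact H (200005 - j * x).toNat j acc le_rfl

theorem pv_whileCost_eq (x : Int) (hx : 0 < x) (pre cnt : Array Int) :
    ∀ (p acc : Int), pvWhileCost x pre cnt p acc =
      acc + ((PySem.List.pyRange p (PySem.Int.floordiv 200004 x + 2) 1).map
        (fun q => if pvCountRange pre ((q - 1) * x + 1) (q * x) > 0 then
            min (pvCountRange pre ((q - 1) * x + 1) (q * x))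
              (if q < 200005 then pvArrGet cnt q else 0) else 0)).sum := by
  have H : ∀ (n : Nat) (p acc : Int), (200005 - (p - 1) * x).toNat ≤ n →
      pvWhileCost x pre cnt p acc =
        acc + ((PySem.List.pyRange p (PySem.Int.floordiv 200004 x + 2) 1).map
          (fun q => if pvCountRange pre ((q - 1) * x + 1) (q * x) > 0 then
              min (pvCountRange pre ((q - 1) * x + 1) (q * x))
                (if q < 200005 then pvArrGet cnt q else 0) else 0)).sum := by
    intro n
    induction n with
    | zero =>
      intro p acc hn
      have hp : ¬ ((p - 1) * x < 200005) := by omega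
      rw [pvWhileCost, dif_neg (by tauto)]
      have hpK : ¬ (p - 1 ≤ PySem.Int.floordiv 200004 x) := by
        rw [PySem.Int.le_floordiv_iff_mul_le hx]; omega
      rw [pv_pyRange_one_nil _ _ (by omega)]
      simp
    | succ m ih =>
      intro p acc hn
      by_cases hp : (p - 1) * x < 200005
      · rw [pvWhileCost, dif_pos ⟨hx, hp⟩]
        have hpK : p - 1 ≤ PySem.Int.floordiv 200004 x := by
          rw [PySem.Int.le_floordiv_iff_mul_le hx]; omega
        have hexp : (p + 1 - 1) * x = (p - 1) * x + x := by ring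
        rw [PySem.List.pyRange_one_cons (by omega)]
        rw [ih (p + 1) _ (by omega)]
        simp only [List.map_cons, List.sum_cons]
        split_ifs <;> ring
      · rw [pvWhileCost, dif_neg (by tauto)]
        have hpK : ¬ (p - 1 ≤ PySem.Int.floordiv 200004 x) := by
          rw [PySem.Int.le_floordiv_iff_mul_le hx]; omega
        rw [pv_pyRange_one_nil _ _ (by omega)]
        simp
  intro p acc
  exact H (200005 - (p - 1) * x).toNat p acc le_rfl

theorem pv_floordiv_nonneg (a b : Int) (ha : 0 ≤ a) (hb : 0 < b) :
    0 ≤ PySem.Int.floordiv a b := by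
  rw [PySem.Int.le_floordiv_iff_mul_le hb]; omega

theorem pv_floordiv_le_K (c x : Int) (hx : 0 < x) (hc : c ≤ 200005) :
    PySem.Int.floordiv (c - 1) x ≤ PySem.Int.floordiv 200004 x := by
  rw [PySem.Int.le_floordiv_iff_mul_le hx]
  have h1 := PySem.Int.floordiv_mul_add_mod (c - 1) x
  have h2 := PySem.Int.mod_nonneg (c - 1) (b := x) hx
  omega

-- Σ_{k=1..K} #{c ∈ v : k·x < c}  =  Σ_{c ∈ v} (if 1 ≤ c then (c-1)//x else 0)
theorem pv_swapSum (x : Int) (hx : 0 < x) (v : List Int)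
    (hv : ∀ c ∈ v, 0 ≤ c ∧ c < 200005) :
    ((PySem.List.pyRange 1 (PySem.Int.floordiv 200004 x + 1) 1).map
        (fun k => ((v.countP (fun c => decide (k * x < c))) : Int))).sum
      = (v.map (fun c => if 1 ≤ c then PySem.Int.floordiv (c - 1) x else 0)).sum := by
  induction v with
  | nil => simp
  | cons c t ih =>
    obtain ⟨hc0, hcM⟩ := hv c (by simp)
    have ht : ∀ c ∈ t, 0 ≤ c ∧ c < 200005 := fun c hc => hv c (by simp [hc])
    have hsplit : ∀ k : Int,
        ((List.countP (fun c' => decide (k * x < c')) (c :: t)) : Int)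
          = ((List.countP (fun c' => decide (k * x < c')) t) : Int)
            + (if decide (k * x < c) = true then (1:Int) else 0) := by
      intro k
      rw [List.countP_cons]
      split_ifs <;> push_cast <;> ring
    rw [List.map_congr_left (fun k _ => hsplit k)]
    rw [PySem.List.sum_map_add_int, ih ht, List.map_cons, List.sum_cons]
    have hcount : ((PySem.List.pyRange 1 (PySem.Int.floordiv 200004 x + 1) 1).map
        (fun k => if decide (k * x < c) = true then (1:Int) else 0)).sum
        = if 1 ≤ c then PySem.Int.floordiv (c - 1) x else 0 := by
      rw [PySem.List.sum_map_ite_one_zero]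
      have hcg : (fun k => decide (k * x < c)) =
          (fun k : Int => decide (k ≤ PySem.Int.floordiv (c - 1) x)) := by
        funext k
        have : (k * x < c) ↔ (k ≤ PySem.Int.floordiv (c - 1) x) := by
          rw [PySem.Int.le_floordiv_iff_mul_le hx]; omega
        simp [this]
      rw [hcg]
      have hK0 : 0 ≤ PySem.Int.floordiv 200004 x := pv_floordiv_nonneg _ _ (by omega) hx
      have harg : (1 : Int) + ((PySem.Int.floordiv 200004 x + 1 - 1).toNat : Int)
          = PySem.Int.floordiv 200004 x + 1 := by omega
      have := pv_countP_pyRange_le (PySem.Int.floordiv (c - 1) x)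
        (PySem.Int.floordiv 200004 x + 1 - 1).toNat 1
      rw [harg] at this
      rw [this]
      by_cases hc1 : 1 ≤ c
      · have hd0 : 0 ≤ PySem.Int.floordiv (c - 1) x := pv_floordiv_nonneg _ _ (by omega) hx
        have hdK : PySem.Int.floordiv (c - 1) x ≤ PySem.Int.floordiv 200004 x :=
          pv_floordiv_le_K c x hx (by omega)
        rw [if_pos hc1]
        omega
      · have hneg : PySem.Int.floordiv (c - 1) x ≤ -1 := by
          by_contra hcon
          have h0 : 0 ≤ PySem.Int.floordiv (c - 1) x := by omega
          rw [PySem.Int.le_floordiv_iff_mul_le hx] at h0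
          omega
        simp only [if_neg hc1]
        omega
    rw [hcount]
    ring

-- get_count_in_range([ (q-1)x+1 , qx ]) counts the items with ceil(c/x) = q
theorem pv_countRange_eq (v : List Int) (hv : ∀ c ∈ v, 0 ≤ c ∧ c < 200005)
    (pre : Array Int)
    (hpre : ∀ t : Int, 0 ≤ t → t < 200005 →
      pvArrGet pre t = ((v.countP (fun c => decide (c ≤ t))) : Int))
    (x q : Int) (hx : 0 < x) (hq : 1 ≤ q) :
    pvCountRange pre ((q - 1) * x + 1) (q * x)
      = ((v.countP (fun c => decide ((q - 1) * x < c ∧ c ≤ q * x))) : Int) := by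
  have hq1x : 0 ≤ (q - 1) * x := mul_nonneg (by omega) (by omega)
  have hqx : (q - 1) * x + x = q * x := by ring
  unfold pvCountRange
  by_cases hbig : (q - 1) * x + 1 ≥ 200005
  · rw [if_pos (Or.inr hbig)]
    have : v.countP (fun c => decide ((q - 1) * x < c ∧ c ≤ q * x)) = 0 := by
      rw [List.countP_eq_zero]
      intro c hc
      obtain ⟨_, hcM⟩ := hv c hc
      simp only [decide_eq_true_eq]
      omega
    omega
  · rw [if_neg (by omega)]
    rw [if_neg (by omega)]
    have he1 : 0 ≤ min (q * x) 200004 := by omega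
    have he2 : min (q * x) 200004 < 200005 := by omega
    rw [hpre _ he1 he2, hpre ((q - 1) * x + 1 - 1) (by omega) (by omega)]
    have hstart : (q - 1) * x + 1 - 1 = (q - 1) * x := by ring
    rw [hstart]
    have hsplit := pv_countP_le_split v ((q - 1) * x) (min (q * x) 200004) (by omega)
    have hcong : v.countP (fun c => decide ((q - 1) * x < c ∧ c ≤ min (q * x) 200004))
        = v.countP (fun c => decide ((q - 1) * x < c ∧ c ≤ q * x)) := by
      apply List.countP_congr
      intro c hc
      obtain ⟨_, hcM⟩ := hv c hc
      simp only [decide_eq_true_eq]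
      constructor <;> (intro hh; constructor <;> omega)
    omega

theorem pv_foldl_max_filter (v : List Int) (hv : ∀ c ∈ v, 0 ≤ c) :
    ∀ m : Int, 0 ≤ m →
      v.foldl (fun a b => max a b) m
        = (v.filter (fun c => decide (1 ≤ c))).foldl (fun a b => max a b) m := by
  induction v with
  | nil => intro m _; rfl
  | cons c t ih =>
    intro m hm
    have hc := hv c (by simp)
    have ht : ∀ c ∈ t, 0 ≤ c := fun c hc => hv c (by simp [hc])
    by_cases h1 : 1 ≤ c
    · simp only [List.filter_cons, decide_eq_true h1, List.foldl_cons]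
      exact ih ht (max m c) (by omega)
    · have hc0 : c = 0 := by omega
      subst hc0
      simp only [List.filter_cons, List.foldl_cons]
      rw [max_eq_left hm]
      exact ih ht m hm

theorem pv_maxD_eq_foldl (v : List Int) (hv : ∀ c ∈ v, 1 ≤ c) :
    PySem.List.maxD v (fun x => x) 0 = v.foldl (fun a b => max a b) 0 := by
  cases v with
  | nil => rfl
  | cons c t =>
    have hc := hv c (by simp)
    rw [PySem.List.maxD, PySem.List.max?_id_cons]
    simp only [Option.getD_some, List.foldl_cons]
    rw [max_eq_right (by omega : (0:Int) ≤ c)]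

theorem pv_key_spec (x c : Int) (hx : 0 < x) (hc : 1 ≤ c ∧ c < 200005) :
    ((-(PySem.Int.floordiv (-c) x)) - 1) * x < c ∧ c ≤ (-(PySem.Int.floordiv (-c) x)) * x ∧
      1 ≤ -(PySem.Int.floordiv (-c) x) ∧
      -(PySem.Int.floordiv (-c) x) < PySem.Int.floordiv 200004 x + 2 := by
  obtain ⟨hb1, hb2⟩ := (PySem.Int.neg_floordiv_neg_eq_iff_of_pos (a := c) (b := x)
    (q := -(PySem.Int.floordiv (-c) x)) hx).mp rfl
  set q := -(PySem.Int.floordiv (-c) x) with hqdef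
  have hq1 : 1 ≤ q := by
    by_contra hcon
    have hq0 : q ≤ 0 := by omega
    have : q * x ≤ 0 := mul_nonpos_of_nonpos_of_nonneg hq0 (by omega)
    omega
  have hqK : q - 1 ≤ PySem.Int.floordiv 200004 x := by
    rw [PySem.Int.le_floordiv_iff_mul_le hx]
    omega
  exact ⟨hb1, hb2, hq1, by omega⟩

theorem pv_count_kc (x : Int) (hx : 0 < x) (v : List Int) (q : Int) :
    (v.map (fun c => -(PySem.Int.floordiv (-c) x))).count q
      = v.countP (fun c => decide ((q - 1) * x < c ∧ c ≤ q * x)) := by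
  rw [List.count_eq_countP, List.countP_map]
  apply List.countP_congr
  intro c _
  simp only [Function.comp]
  have := PySem.Int.neg_floordiv_neg_eq_iff_of_pos (a := c) (b := x) (q := q) hx
  constructor
  · intro hh
    have h1 : -(PySem.Int.floordiv (-c) x) = q := by simpa using hh
    simp only [decide_eq_true_eq]
    exact (PySem.Int.neg_floordiv_neg_eq_iff_of_pos hx).mp h1
  · intro hh
    simp only [decide_eq_true_eq] at hh
    have := (PySem.Int.neg_floordiv_neg_eq_iff_of_pos hx).mpr hh
    simpa using this

theorem pv_sum_reshuffle (R : List Int) (hR : R.Nodup) (kc : List Int) (m : Int → Int)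
    (hmem : ∀ q ∈ kc, q ∈ R) :
    (R.map (fun q => if 0 < ((kc.count q : Nat) : Int) then m q else 0)).sum
      = ((PySem.Set.ofList kc).map m).sum := by
  rw [pv_sum_ite_eq_sum_filter]
  refine List.Perm.sum_eq (List.Perm.map m ?_)
  rw [List.perm_ext_iff_of_nodup (hR.filter _) (PySem.Set.nodup_ofList kc)]
  intro q
  rw [PySem.Set.mem_ofList, List.mem_filter]
  constructor
  · rintro ⟨_, hcnt⟩
    simp only [decide_eq_true_eq] at hcnt
    rw [← List.count_pos_iff]
    omega
  · intro hq
    refine ⟨hmem q hq, ?_⟩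
    simp only [decide_eq_true_eq]
    rw [← List.count_pos_iff] at hq
    omega

def pvVB (l : List Int) : List Int := l.filter (fun c => decide (1 ≤ c ∧ c < 200005))

def pvKc (l : List Int) (x : Int) : List Int :=
  (pvVB l).map (fun c => -(PySem.Int.floordiv (-c) x))

def pvInc (n y : Int) (l : List Int) (x : Int) : Int :=
  (n + ((pvVB l).map (fun c => PySem.Int.floordiv (c - 1) x)).sum)
    - (n - ((PySem.Set.ofList (pvKc l x)).map
        (fun q => min (((pvKc l x).count q : Nat) : Int) ((((pvVB l).count q : Nat)) : Int))).sum) * y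

def pvCanon (n y : Int) (l : List Int) : Int :=
  match (PySem.List.pyRange 2 ((pvVB l).foldl (fun a b => max a b) 0 + 2) 1).foldl
      (fun (best : Option Int) x =>
        match best with
        | none => some (pvInc n y l x)
        | some b => if pvInc n y l x > b then some (pvInc n y l x) else some b) none with
  | none => 0
  | some v => v

theorem pv_vB_eq (l : List Int) :
    (l.filter (fun c => decide (c < 200005))).filter (fun c => decide (1 ≤ c)) = pvVB l := by
  rw [pvVB, List.filter_filter]
  refine List.filter_congr ?_
  intro c _
  simp [decide_eq_true_eq, and_comm]

theorem pv_A_eq (n y : Int) (l : List Int) (hne : ¬ l = []) (hPre : ∀ c ∈ l, 0 ≤ c) :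
    solve_from_cpp_logic n y l = pvCanon n y l := by
  have hvB1mem : ∀ c ∈ pvVB l, 1 ≤ c ∧ c < 200005 := by
    intro c hc
    rw [pvVB, List.mem_filter] at hc
    simpa using hc.2
  have hvA : ∀ c ∈ l.filter (fun c => decide (c < 200005)), 0 ≤ c ∧ c < 200005 := by
    intro c hc
    rw [List.mem_filter] at hc
    have := hPre c hc.1
    simp only [decide_eq_true_eq] at hc
    exact ⟨this, hc.2⟩
  simp only [solve_from_cpp_logic, if_neg hne]
  rw [PySem.List.foldl_ite_eq_foldl_filter (p := fun c : Int => c < 200005)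
    (f := fun (st : Array Int × Int) c => (pvArrSet st.1 c (pvArrGet st.1 c + 1), max st.2 c))]
  rw [PySem.List.foldl_prod_mk (f := fun a c => pvArrSet a c (pvArrGet a c + 1))
    (g := fun (m : Int) c => max m c) (l.filter (fun c => decide (c < 200005)))
    (Array.replicate 200005 0) 0]
  set vA := l.filter (fun c => decide (c < 200005)) with hvAdef
  simp only
  set A1 := vA.foldl (fun a c => pvArrSet a c (pvArrGet a c + 1)) (Array.replicate 200005 0) with hA1def
  set mxA := vA.foldl (fun m c => max m c) 0 with hmxdef
  set preF := (PySem.List.pyRange 1 200005 1).foldl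
      (fun a i => pvArrSet a i (pvArrGet a (i - 1) + pvArrGet A1 i))
      (pvArrSet (Array.replicate 200005 0) 0 (pvArrGet A1 0)) with hpredef
  set cpF := (PySem.List.pyRange 0 200004 1).foldl
      (fun a i => pvArrSet a i (pvArrGet A1 (i + 1))) (Array.replicate 200005 0) with hcpdef
  set geF := (PySem.List.pyRange 200003 (-1) (-1)).foldl
      (fun a i => pvArrSet a i (pvArrGet a (i + 1) + pvArrGet cpF i))
      (Array.replicate 200005 0) with hgedef
  have hA1facts := pv_arrCount vA hvA (Array.replicate 200005 0) (by simp)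
  have hA1size : A1.size = 200005 := by rw [hA1def]; exact hA1facts.1
  have hcnt : ∀ i : Int, 0 ≤ i → pvArrGet A1 i = ((vA.count i : Nat) : Int) := by
    intro i hi
    rw [hA1def, hA1facts.2 i hi, pvArrGet_replicate]
    ring
  -- prefix array characterization
  have hstepPre : ∀ i : Int, 1 ≤ i → i < 200005 →
      ((vA.countP (fun c => decide (c ≤ i)) : Nat) : Int)
        = ((vA.countP (fun c => decide (c ≤ i - 1)) : Nat) : Int) + pvArrGet A1 i := by
    intro i h1 h2
    rw [hcnt i (by omega)]
    have := pv_countP_le_succ vA i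
    omega
  have hpre0 : ∀ t : Int, 0 ≤ t → t < 1 →
      pvArrGet (pvArrSet (Array.replicate 200005 0) 0 (pvArrGet A1 0)) t
        = ((vA.countP (fun c => decide (c ≤ t)) : Nat) : Int) := by
    intro t ht1 ht2
    have ht0 : t = 0 := by omega
    subst ht0
    rw [pvArrGet_set_self _ _ _ le_rfl (by simp)]
    rw [hcnt 0 le_rfl]
    have h1 := pv_countP_le_succ vA 0
    have h2 : vA.countP (fun c => decide (c ≤ 0 - 1)) = 0 := by
      rw [List.countP_eq_zero]
      intro c hc
      have := (hvA c hc).1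
      simp only [decide_eq_true_eq]
      omega
    omega
  have hsweep := pv_sweepUp
      (g := fun t => ((vA.countP (fun c => decide (c ≤ t)) : Nat) : Int))
      (h := fun i => pvArrGet A1 i) hstepPre 200004 1
      (pvArrSet (Array.replicate 200005 0) 0 (pvArrGet A1 0))
      (by norm_num) (by norm_num) (by rw [size_pvArrSet]; simp) hpre0
  have hpreChar : ∀ t : Int, 0 ≤ t → t < 200005 →
      pvArrGet preF t = ((vA.countP (fun c => decide (c ≤ t)) : Nat) : Int) := by
    rw [hpredef]; exact hsweep.2
  -- count_prime array characterization
  have hcp := pv_sweepMap (h := fun i => pvArrGet A1 (i + 1)) 200004 0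
      (Array.replicate 200005 0) (by norm_num) le_rfl (by simp)
      (fun t ht1 ht2 => absurd ht2 (by omega)) (fun t _ => rfl)
  have hcpChar : ∀ t : Int, 0 ≤ t → t < 200004 → pvArrGet cpF t = pvArrGet A1 (t + 1) := by
    rw [hcpdef]; exact hcp.2.1
  -- ge_count_prime array characterization
  have hstepGe : ∀ i : Int, 0 ≤ i → i ≤ 200003 →
      ((vA.countP (fun c => decide (i < c)) : Nat) : Int)
        = ((vA.countP (fun c => decide (i + 1 < c)) : Nat) : Int) + pvArrGet cpF i := by
    intro i h1 h2
    rw [hcpChar i h1 (by omega), hcnt (i + 1) (by omega)]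
    have := pv_countP_gt_succ vA i
    omega
  have hgeTop : ∀ t : Int, 200003 < t → t ≤ 200004 →
      pvArrGet (Array.replicate 200005 (0:Int)) t
        = ((vA.countP (fun c => decide (t < c)) : Nat) : Int) := by
    intro t h1 h2
    rw [pvArrGet_replicate]
    have : vA.countP (fun c => decide (t < c)) = 0 := by
      rw [List.countP_eq_zero]
      intro c hc
      have := (hvA c hc).2
      simp only [decide_eq_true_eq]
      omega
    omega
  have hge := pv_sweepDown
      (g := fun t => ((vA.countP (fun c => decide (t < c)) : Nat) : Int))
      (h := fun i => pvArrGet cpF i) hstepGe 200004 200003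
      (Array.replicate 200005 0) (by norm_num) (by norm_num) (by simp) hgeTop
  have hgeChar : ∀ t : Int, 0 ≤ t → t ≤ 200004 →
      pvArrGet geF t = ((vA.countP (fun c => decide (t < c)) : Nat) : Int) := by
    rw [hgedef]; exact hge.2
  -- per-x incomes agree
  have hinc : ∀ x : Int, 2 ≤ x →
      (n + pvWhileRev x geF 1 0) - (n - pvWhileCost x preF A1 1 0) * y = pvInc n y l x := by
    intro x hx2
    have hx0 : (0:Int) < x := by omega
    have hKx : PySem.Int.floordiv 200004 x * x ≤ 200004 :=
      (PySem.Int.le_floordiv_iff_mul_le hx0).mp le_rfl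
    have hrev : pvWhileRev x geF 1 0
        = ((pvVB l).map (fun c => PySem.Int.floordiv (c - 1) x)).sum := by
      rw [pv_whileRev_eq x hx0 geF 1 0]
      have hmapeq : (PySem.List.pyRange 1 (PySem.Int.floordiv 200004 x + 1) 1).map
            (fun k => pvArrGet geF (k * x))
          = (PySem.List.pyRange 1 (PySem.Int.floordiv 200004 x + 1) 1).map
            (fun k => ((vA.countP (fun c => decide (k * x < c)) : Nat) : Int)) := by
        refine List.map_congr_left ?_
        intro k hk
        rw [PySem.List.mem_pyRange_one] at hk
        have hk1 : 1 ≤ k := hk.1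
        have hkK : k ≤ PySem.Int.floordiv 200004 x := by omega
        have hkx0 : 0 ≤ k * x := mul_nonneg (by omega) (by omega)
        have hkxM : k * x ≤ 200004 :=
          le_trans (mul_le_mul_of_nonneg_right hkK (by omega)) hKx
        exact hgeChar (k * x) hkx0 hkxM
      rw [hmapeq, pv_swapSum x hx0 vA hvA]
      rw [pv_sum_ite_eq_sum_filter vA (fun c => 1 ≤ c) (fun c => PySem.Int.floordiv (c - 1) x)]
      rw [hvAdef, pv_vB_eq]
      ring
    have hcost : pvWhileCost x preF A1 1 0
        = ((PySem.Set.ofList (pvKc l x)).map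
            (fun q => min (((pvKc l x).count q : Nat) : Int)
              ((((pvVB l).count q : Nat)) : Int))).sum := by
      rw [pv_whileCost_eq x hx0 preF A1 1 0]
      have hmapeq : (PySem.List.pyRange 1 (PySem.Int.floordiv 200004 x + 2) 1).map
            (fun q => if pvCountRange preF ((q - 1) * x + 1) (q * x) > 0 then
                min (pvCountRange preF ((q - 1) * x + 1) (q * x))
                  (if q < 200005 then pvArrGet A1 q else 0) else 0)
          = (PySem.List.pyRange 1 (PySem.Int.floordiv 200004 x + 2) 1).map
            (fun q => if 0 < (((pvKc l x).count q : Nat) : Int) then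
                min (((pvKc l x).count q : Nat) : Int) ((((pvVB l).count q : Nat)) : Int) else 0) := by
        refine List.map_congr_left ?_
        intro q hq
        rw [PySem.List.mem_pyRange_one] at hq
        have hq1 : 1 ≤ q := hq.1
        have hnum : pvCountRange preF ((q - 1) * x + 1) (q * x)
            = (((pvKc l x).count q : Nat) : Int) := by
          rw [pv_countRange_eq vA hvA preF hpreChar x q hx0 hq1]
          have h1 : (pvKc l x).count q
              = (pvVB l).countP (fun c => decide ((q - 1) * x < c ∧ c ≤ q * x)) :=
            pv_count_kc x hx0 (pvVB l) q
          have h2 : (pvVB l).countP (fun c => decide ((q - 1) * x < c ∧ c ≤ q * x))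
              = vA.countP (fun c => decide ((q - 1) * x < c ∧ c ≤ q * x)) := by
            rw [hvAdef, ← pv_vB_eq, List.countP_filter]
            refine List.countP_congr ?_
            intro c _
            have hq1x : 0 ≤ (q - 1) * x := mul_nonneg (by omega) (by omega)
            simp only [Bool.and_eq_true, decide_eq_true_eq]
            constructor
            · intro hh; exact hh.1
            · intro hh; exact ⟨hh, by omega⟩
          rw [h1, h2]
        have hcntq : (if q < 200005 then pvArrGet A1 q else 0)
            = (((pvVB l).count q : Nat) : Int) := by
          by_cases hqM : q < 200005
          · rw [if_pos hqM, hcnt q (by omega)]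
            have : (pvVB l).count q = vA.count q := by
              rw [hvAdef, ← pv_vB_eq]
              exact List.count_filter (by simp; omega)
            rw [this]
          · rw [if_neg hqM]
            have : (pvVB l).count q = 0 := by
              rw [List.count_eq_zero]
              intro hmemq
              have hb := hvB1mem q hmemq
              omega
            rw [this]
            simp
        rw [hnum, hcntq]
      rw [hmapeq]
      have hmem : ∀ q ∈ pvKc l x, q ∈ PySem.List.pyRange 1 (PySem.Int.floordiv 200004 x + 2) 1 := by
        intro q hqkc
        rw [pvKc, List.mem_map] at hqkc
        obtain ⟨c, hcmem, hceq⟩ := hqkc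
        have hcb : 1 ≤ c ∧ c < 200005 := hvB1mem c hcmem
        have hks := pv_key_spec x c hx0 hcb
        rw [PySem.List.mem_pyRange_one]
        subst hceq
        exact ⟨hks.2.2.1, hks.2.2.2⟩
      rw [pv_sum_reshuffle _ (pv_nodup_pyRange_one _ _) (pvKc l x) _ hmem]
      ring
    rw [hrev, hcost, pvInc]
  have hmaxA : mxA = (pvVB l).foldl (fun a b => max a b) 0 := by
    rw [hmxdef, pv_foldl_max_filter vA (fun c hc => (hvA c hc).1) 0 le_rfl, hvAdef, pv_vB_eq]
  rw [hmaxA, pvCanon]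
  have hfold : (PySem.List.pyRange 2 ((pvVB l).foldl (fun a b => max a b) 0 + 2) 1).foldl
      (fun (mi : Option Int) x =>
        some (match mi with
              | none => n + pvWhileRev x geF 1 0 - (n - pvWhileCost x preF A1 1 0) * y
              | some v => max v (n + pvWhileRev x geF 1 0 - (n - pvWhileCost x preF A1 1 0) * y)))
      none
      = (PySem.List.pyRange 2 ((pvVB l).foldl (fun a b => max a b) 0 + 2) 1).foldl
        (fun (best : Option Int) x =>
          match best with
          | none => some (pvInc n y l x)
          | some b => if pvInc n y l x > b then some (pvInc n y l x) else some b) none := by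
    refine PySem.List.foldl_congr_mem _ _ _ _ ?_
    intro acc x hx
    rw [PySem.List.mem_pyRange_one] at hx
    have hi := hinc x hx.1
    cases acc with
    | none => exact congrArg some hi
    | some b =>
      show some (max b (n + pvWhileRev x geF 1 0 - (n - pvWhileCost x preF A1 1 0) * y))
        = if pvInc n y l x > b then some (pvInc n y l x) else some b
      rw [show n + pvWhileRev x geF 1 0 - (n - pvWhileCost x preF A1 1 0) * y
            = pvInc n y l x from hi]
      rcases lt_or_ge b (pvInc n y l x) with h | h
      · rw [if_pos h, max_eq_right (le_of_lt h)]
      · rw [if_neg (by omega), max_eq_left (by omega)]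
  rw [hfold]

theorem pv_B_eq (n y : Int) (l : List Int) (hne : ¬ l = []) :
    solve_from_cpp_logic_alt n y l = pvCanon n y l := by
  have hvB1 : ∀ c ∈ pvVB l, 1 ≤ c ∧ c < 200005 := by
    intro c hc
    rw [pvVB, List.mem_filter] at hc
    simpa using hc.2
  simp only [solve_from_cpp_logic_alt, if_neg hne]
  rw [show l.filter (fun c => decide (1 ≤ c ∧ c < 200005)) = pvVB l from rfl]
  rw [pv_maxD_eq_foldl (pvVB l) (fun c hc => (hvB1 c hc).1)]
  rw [pvCanon]
  by_cases hmx : (pvVB l).foldl (fun a b => max a b) 0 = 0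
  · rw [if_pos hmx, hmx]
    rw [pv_pyRange_one_nil _ _ (by omega)]
    rfl
  · rw [if_neg hmx]
    have hfold : ∀ (x : Int), 2 ≤ x → ∀ (best : Option Int),
        (let st := (pvVB l).foldl
            (fun (st : Int × PySem.Dict Int Int) c =>
              (st.1 + PySem.Int.floordiv (c - 1) x,
               st.2.insert (-(PySem.Int.floordiv (-c) x))
                 (st.2.getD (-(PySem.Int.floordiv (-c) x)) 0 + 1)))
            (n, PySem.Dict.empty)
         let reused := (st.2.items.map (fun pk => min pk.2
             (((pvVB l).foldl (fun (d : PySem.Dict Int Int) c => d.insert c (d.getD c 0 + 1))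
               PySem.Dict.empty).getD pk.1 0))).sum
         let income := st.1 - (n - reused) * y
         match best with
         | none => some income
         | some b => if income > b then some income else some b)
        = (match best with
           | none => some (pvInc n y l x)
           | some b => if pvInc n y l x > b then some (pvInc n y l x) else some b) := by
      intro x hx best
      have hx0 : (0:Int) < x := by omega
      have hsplit : (pvVB l).foldl
            (fun (st : Int × PySem.Dict Int Int) c =>
              (st.1 + PySem.Int.floordiv (c - 1) x,
               st.2.insert (-(PySem.Int.floordiv (-c) x))
                 (st.2.getD (-(PySem.Int.floordiv (-c) x)) 0 + 1)))
            (n, PySem.Dict.empty)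
          = ((pvVB l).foldl (fun s c => s + PySem.Int.floordiv (c - 1) x) n,
             (pvVB l).foldl (fun (d : PySem.Dict Int Int) c =>
               d.insert (-(PySem.Int.floordiv (-c) x))
                 (d.getD (-(PySem.Int.floordiv (-c) x)) 0 + 1)) PySem.Dict.empty) :=
        PySem.List.foldl_prod_mk (f := fun s c => s + PySem.Int.floordiv (c - 1) x)
          (g := fun (d : PySem.Dict Int Int) c =>
            d.insert (-(PySem.Int.floordiv (-c) x))
              (d.getD (-(PySem.Int.floordiv (-c) x)) 0 + 1)) (pvVB l) n PySem.Dict.empty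
      have hsum : (pvVB l).foldl (fun s c => s + PySem.Int.floordiv (c - 1) x) n
          = n + ((pvVB l).map (fun c => PySem.Int.floordiv (c - 1) x)).sum :=
        PySem.List.foldl_add _ _ _
      have hdict : (pvVB l).foldl (fun (d : PySem.Dict Int Int) c =>
            d.insert (-(PySem.Int.floordiv (-c) x))
              (d.getD (-(PySem.Int.floordiv (-c) x)) 0 + 1)) PySem.Dict.empty
          = PySem.Dict.counter (pvKc l x) := by
        rw [pvKc, ← PySem.Dict.foldl_insert_getD_add_one_eq_counter, List.foldl_map]
      have horig : (pvVB l).foldl (fun (d : PySem.Dict Int Int) c =>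
            d.insert c (d.getD c 0 + 1)) PySem.Dict.empty = PySem.Dict.counter (pvVB l) :=
        PySem.Dict.foldl_insert_getD_add_one_eq_counter _
      have hreused : ((PySem.Dict.counter (pvKc l x)).items.map (fun pk => min pk.2
            ((PySem.Dict.counter (pvVB l)).getD pk.1 0))).sum
          = ((PySem.Set.ofList (pvKc l x)).map
              (fun q => min (((pvKc l x).count q : Nat) : Int)
                ((((pvVB l).count q : Nat)) : Int))).sum := by
        rw [PySem.Dict.items_counter, List.map_map]
        refine congrArg List.sum (List.map_congr_left ?_)
        intro q _
        simp only [Function.comp]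
        rw [PySem.Dict.getD_counter]
      simp only [hsplit, hsum, hdict, horig, hreused]
      rfl
    have hranges : (PySem.List.pyRange 2 ((pvVB l).foldl (fun a b => max a b) 0 + 2) 1).foldl
        (fun (best : Option Int) x =>
          let st := (pvVB l).foldl
              (fun (st : Int × PySem.Dict Int Int) c =>
                (st.1 + PySem.Int.floordiv (c - 1) x,
                 st.2.insert (-(PySem.Int.floordiv (-c) x))
                   (st.2.getD (-(PySem.Int.floordiv (-c) x)) 0 + 1)))
              (n, PySem.Dict.empty)
          let reused := (st.2.items.map (fun pk => min pk.2
              (((pvVB l).foldl (fun (d : PySem.Dict Int Int) c => d.insert c (d.getD c 0 + 1))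
                PySem.Dict.empty).getD pk.1 0))).sum
          let income := st.1 - (n - reused) * y
          match best with
          | none => some income
          | some b => if income > b then some income else some b) none
        = (PySem.List.pyRange 2 ((pvVB l).foldl (fun a b => max a b) 0 + 2) 1).foldl
          (fun (best : Option Int) x =>
            match best with
            | none => some (pvInc n y l x)
            | some b => if pvInc n y l x > b then some (pvInc n y l x) else some b) none := by
      refine PySem.List.foldl_congr_mem _ _ _ _ ?_
      intro acc x hx
      rw [PySem.List.mem_pyRange_one] at hx
      exact hfold x hx.1 acc
    rw [hranges]

-- ===== VERDICT (by name: the statement is the Claim_ definition above) =====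
theorem solve_from_cpp_logic_spec : Claim_equal_solve_from_cpp_logic := by
  intro n y l _ hPre
  unfold Spec_solve_from_cpp_logic
  by_cases hne : l = []
  · subst hne
    rfl
  · exact (pv_A_eq n y l hne hPre).trans (pv_B_eq n y l hne).symm
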